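-- pv_equiv track=rewrite | github.com/gcomneno/crystal-codec-gcc-v1 | src/gcc_v1/cluster.py | build_bands
-- ===== SOURCE A (Python) =====
-- from math import isqrt
-- from typing import Any, Mapping, Sequence
--
-- def _primes_up_to(n: int) -> list[int]:
--     """Restituisce tutti i primi <= n (sieve semplice)."""
--     if n < 2:
--         return []
--     sieve = [True] * (n + 1)
--     sieve[0] = sieve[1] = False
--     for p in range(2, isqrt(n) + 1):
--         if sieve[p]:
--             step = p
--             start = p * p
--             sieve[start : n + 1 : step] = [False] * len(range(start, n + 1, step))
--     return [i for i, is_prime in enumerate(sieve) if is_prime]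
--
-- def build_bands(
--     primes: Sequence[int], mode: str = "canonical", band_size: int = 3
-- ) -> list[list[int]]:
--     """Costruisce le bande B_k a partire dalla base di primi GCC.
--
--     mode="canonical":
--         - genera la lista dei primi standard fino a max(primes),
--         - B0 = {2} se 2 è nella base,
--         - le bande successive sono blocchi di band_size primi successivi,
--           intersecati con la base.
--
--     mode="by-basis":
--         - ordina primes,
--         - B0 = [primes_sorted[0]],
--         - B1, B2, ... sono blocchi consecutivi di band_size elementi
--           nella lista base stessa.
--     """
--     if not primes:
--         return []
--
--     basis = sorted({int(p) for p in primes})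
--     bands: list[list[int]] = []
--
--     if mode == "by-basis":
--         bands.append([basis[0]])
--         rest = basis[1:]
--         for i in range(0, len(rest), band_size):
--             chunk = rest[i : i + band_size]
--             if chunk:
--                 bands.append(chunk)
--         return bands
--
--     if mode != "canonical":
--         msg = f"modalità banda non supportata: {mode!r}"
--         raise ValueError(msg)
--
--     max_p = basis[-1]
--     all_primes = _primes_up_to(max_p)
--     basis_set = set(basis)
--
--     # B0: solo 2, se presente nella base.
--     if 2 in basis_set:
--         bands.append([2])
--         start_index = 1
--     else:
--         start_index = 0
--
--     # Bande successive: blocchi di band_size sulla sequenza canonica.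
--     for idx in range(start_index, len(all_primes), band_size):
--         chunk = all_primes[idx : idx + band_size]
--         band = [p for p in chunk if p in basis_set]
--         if band:
--             bands.append(band)
--
--     return bands
-- ===== SOURCE B (Python) =====
-- from math import isqrt
--
--
-- def _primes_up_to(n: int) -> list[int]:
--     if n < 2:
--         return []
--     sieve = [True] * (n + 1)
--     sieve[0] = sieve[1] = False
--     for p in range(2, isqrt(n) + 1):
--         if sieve[p]:
--             step = p
--             start = p * p
--             sieve[start : n + 1 : step] = [False] * len(range(start, n + 1, step))
--     return [i for i, is_prime in enumerate(sieve) if is_prime]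
--
--
-- def build_bands(primes, mode="canonical", band_size=3):
--     if not primes:
--         return []
--
--     basis = sorted({int(p) for p in primes})
--
--     if mode == "by-basis":
--         bands = [[basis[0]]]
--         rest = basis[1:]
--         for i in range(0, len(rest), band_size):
--             chunk = rest[i : i + band_size]
--             if chunk:
--                 bands.append(chunk)
--         return bands
--
--     if mode != "canonical":
--         msg = f"modalità banda non supportata: {mode!r}"
--         raise ValueError(msg)
--
--     # Inverted traversal: look each basis prime up in the canonical index
--     # and bucket it by block number, instead of scanning canonical chunks.
--     pos = {p: i for i, p in enumerate(_primes_up_to(basis[-1]))}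
--
--     if 2 in basis:
--         bands = [[2]]
--         start = 1
--     else:
--         bands = []
--         start = 0
--
--     cur: list[int] = []
--     last_block = None
--     for p in basis:
--         i = pos.get(p)
--         if i is None or i < start:
--             continue
--         b = (i - start) // band_size
--         if b != last_block and cur:
--             bands.append(cur)
--             cur = []
--         cur.append(p)
--         last_block = b
--     if cur:
--         bands.append(cur)
--     return bands
-- ===== Notes on version B (the rewrite author's own statement) =====
-- stated objective: alternative
-- what changed: In canonical mode B replaces A's chunk-scan over all canonical primes (slice each band_size block and filter it through the basis set) with an inverted traversal: a prime-to-index map is built once and one pass over the sorted basis looks each prime up and groups it by its block number.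
-- outside the precondition, e.g. on build_bands([2, 3, 5], 'canonical', -1): A returns [[2]], B returns [[2], [3], [5]]
import Mathlib
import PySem

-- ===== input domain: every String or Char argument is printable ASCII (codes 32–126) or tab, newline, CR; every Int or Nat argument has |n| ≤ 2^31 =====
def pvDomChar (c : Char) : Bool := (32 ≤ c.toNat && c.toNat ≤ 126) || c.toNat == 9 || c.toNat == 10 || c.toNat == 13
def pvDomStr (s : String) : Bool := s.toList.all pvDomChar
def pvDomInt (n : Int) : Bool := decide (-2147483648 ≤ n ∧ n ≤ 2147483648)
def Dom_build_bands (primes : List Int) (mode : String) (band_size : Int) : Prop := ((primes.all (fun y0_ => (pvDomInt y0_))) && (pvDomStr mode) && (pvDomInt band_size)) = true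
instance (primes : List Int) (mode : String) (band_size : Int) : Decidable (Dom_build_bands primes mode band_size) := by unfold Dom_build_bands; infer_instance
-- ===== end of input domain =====

-- B replaces A's canonical chunk-scan over all sieve primes by a prime→index map
-- and a single grouping pass over the sorted basis (alternative algorithm, same cost class).


-- ===== PORT A =====
-- _primes_up_to: simple sieve; shared verbatim by A and B (Source B repeats it verbatim).
-- All set indices are nonnegative by construction, so `.toNat` is exact here.
def primesUpTo (n : Int) : List Int :=
  if n < 2 then []
  else
    let sieve0 : List Bool := List.replicate (n.toNat + 1) true
    let sieve1 := (sieve0.set 0 false).set 1 false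
    let sieve2 := (PySem.List.pyRange 2 ((Nat.sqrt n.toNat : Int) + 1) 1).foldl
      (fun sv p =>
        if sv.getD p.toNat false then
          -- sieve[p*p : n+1 : p] = [False] * …  : set every p-th index to False
          (PySem.List.pyRange (p * p) (n + 1) p).foldl (fun sv2 i => sv2.set i.toNat false) sv
        else sv) sieve1
    ((PySem.List.enumerate sieve2 0).filter (fun pr => pr.2)).map (fun pr => pr.1)

def build_bands (primes : List Int) (mode : String) (band_size : Int) : List (List Int) :=
  if primes = [] then []
  else
    let basis := PySem.List.sorted (PySem.Set.ofList primes) (fun x => x) false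
    if mode = "by-basis" then
      let bands : List (List Int) := [[PySem.List.pyGetD basis 0 0]]   -- basis[0]; basis ≠ [] here
      let rest := PySem.List.slice basis (some 1) none
      (PySem.List.pyRange 0 (rest.length : Int) band_size).foldl
        (fun bands i =>
          let chunk := PySem.List.slice rest (some i) (some (i + band_size))
          if chunk ≠ [] then bands ++ [chunk] else bands) bands
    else if mode ≠ "canonical" then []   -- Python raises ValueError here; excluded by Pre_
    else
      let max_p := PySem.List.pyGetD basis (-1) 0                      -- basis[-1]; basis ≠ [] here
      let all_primes := primesUpTo max_p
      let basis_set : PySem.Set Int := PySem.Set.ofList basis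
      -- B0: bands = [[2]] and start_index = 1 iff 2 is in the basis set
      let bands0 : List (List Int) := if PySem.Set.contains basis_set 2 then [[2]] else []
      let start_index : Int := if PySem.Set.contains basis_set 2 then 1 else 0
      (PySem.List.pyRange start_index (all_primes.length : Int) band_size).foldl
        (fun bands idx =>
          let chunk := PySem.List.slice all_primes (some idx) (some (idx + band_size))
          let band := chunk.filter (fun p => PySem.Set.contains basis_set p)
          if band ≠ [] then bands ++ [band] else bands) bands0

-- ===== PORT B =====
def build_bands_alt (primes : List Int) (mode : String) (band_size : Int) : List (List Int) :=
  if primes = [] then []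
  else
    let basis := PySem.List.sorted (PySem.Set.ofList primes) (fun x => x) false
    if mode = "by-basis" then
      let bands : List (List Int) := [[PySem.List.pyGetD basis 0 0]]
      let rest := PySem.List.slice basis (some 1) none
      (PySem.List.pyRange 0 (rest.length : Int) band_size).foldl
        (fun bands i =>
          let chunk := PySem.List.slice rest (some i) (some (i + band_size))
          if chunk ≠ [] then bands ++ [chunk] else bands) bands
    else if mode ≠ "canonical" then []   -- Python raises ValueError here; excluded by Pre_
    else
      -- pos = {p: i for i, p in enumerate(_primes_up_to(basis[-1]))}
      let pos : PySem.Dict Int Int :=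
        (PySem.List.enumerate (primesUpTo (PySem.List.pyGetD basis (-1) 0)) 0).foldl
          (fun d pr => d.insert pr.2 pr.1) PySem.Dict.empty
      let bands0 : List (List Int) := if basis.contains 2 then [[2]] else []
      let start : Int := if basis.contains 2 then 1 else 0
      let st := basis.foldl
        (fun (st : List (List Int) × List Int × Option Int) p =>
          match pos.get? p with
          | none => st
          | some i =>
            if i < start then st
            else
              let b := PySem.Int.floordiv (i - start) band_size
              if some b ≠ st.2.2 ∧ st.2.1 ≠ [] then (st.1 ++ [st.2.1], [p], some b)
              else (st.1, st.2.1 ++ [p], some b))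
        (bands0, [], none)
      if st.2.1 ≠ [] then st.1 ++ [st.2.1] else st.1

-- ===== PRECONDITION & SPEC =====
-- Pre_ excludes (for a nonempty basis): unsupported modes and band_size = 0, where A raises
-- ValueError; and negative band_size in canonical mode, a degenerate input outside the natural
-- domain (a band size is a positive count), where A silently emits no chunk bands at all.
def Pre_build_bands (primes : List Int) (mode : String) (band_size : Int) : Prop :=
  primes = [] ∨ (mode = "by-basis" ∧ band_size ≠ 0) ∨ (mode = "canonical" ∧ 1 ≤ band_size)
instance (primes : List Int) (mode : String) (band_size : Int) : Decidable (Pre_build_bands primes mode band_size) := by unfold Pre_build_bands; infer_instance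

def pvWitness_build_bands : List Int × String × Int := ([2, 3, 5, 7, 11, 13], "canonical", 2)

def Spec_build_bands (primes : List Int) (mode : String) (band_size : Int) (out : List (List Int)) : Prop := out = build_bands_alt primes mode band_size
instance (primes : List Int) (mode : String) (band_size : Int) (out : List (List Int)) : Decidable (Spec_build_bands primes mode band_size out) := by unfold Spec_build_bands; infer_instance

-- ===== CLAIM (what is proved, stated in full; the proofs are below) =====
def Claim_equal_build_bands : Prop := ∀ (primes : List Int) (mode : String) (band_size : Int), Dom_build_bands primes mode band_size → Pre_build_bands primes mode band_size → Spec_build_bands primes mode band_size (build_bands primes mode band_size)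

-- ===== LEMMAS AND PROOFS =====

-- Common band predicate / chunking normal form (step k'+1) used to bridge the two ports.
def pvCondBand (band : List Int) : List (List Int) := if band ≠ [] then [band] else []

def pvChunkBands (P : Int → Bool) (k' : Nat) (xs : List Int) : List (List Int) :=
  if xs = [] then []
  else pvCondBand ((xs.take (k' + 1)).filter P) ++ pvChunkBands P k' (xs.drop (k' + 1))
termination_by xs.length
decreasing_by
  rename_i h
  have : 0 < xs.length := List.length_pos_iff.mpr h
  simp [List.length_drop]; omega

-- B's grouping step on an (index, prime) pair (index already shifted by start).
def pvGStep (k : Int) (st : List (List Int) × List Int × Option Int) (pr : Int × Int) :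
    List (List Int) × List Int × Option Int :=
  let b := PySem.Int.floordiv pr.1 k
  if some b ≠ st.2.2 ∧ st.2.1 ≠ [] then (st.1 ++ [st.2.1], [pr.2], some b)
  else (st.1, st.2.1 ++ [pr.2], some b)

def pvFinish (st : List (List Int) × List Int × Option Int) : List (List Int) :=
  if st.2.1 ≠ [] then st.1 ++ [st.2.1] else st.1

def pvPairs (P : Int → Bool) (xs : List Int) : List (Int × Int) :=
  (PySem.List.enumerate xs 0).filter (fun pr => P pr.2)

def pvPosDict (S : List Int) : PySem.Dict Int Int :=
  (PySem.List.enumerate S 0).foldl (fun d pr => d.insert pr.2 pr.1) PySem.Dict.empty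

-- range with a positive step: nil and cons unfoldings (not provided by PySem for step ≠ 1)
theorem pvPyRange_pos_nil (a b s : Int) (hs : 0 < s) (h : b ≤ a) :
    PySem.List.pyRange a b s = [] := by
  rw [PySem.List.pyRange_of_pos a b hs]
  simp [not_lt.mpr h]

theorem pvPyRange_pos_cons (a b s : Int) (hs : 0 < s) (h : a < b) :
    PySem.List.pyRange a b s = a :: PySem.List.pyRange (a + s) b s := by
  rw [PySem.List.pyRange_of_pos a b hs, PySem.List.pyRange_of_pos (a + s) b hs]
  rw [if_pos h]
  have hds : ((b - a + s - 1) / s) ≥ 1 := by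
    rw [ge_iff_le, Int.le_ediv_iff_mul_le hs]; omega
  by_cases h2 : a + s < b
  · rw [if_pos h2]
    have hsub : (b - (a + s) + s - 1) = (b - a + s - 1) - 1 * s := by ring
    have : (b - (a + s) + s - 1) / s = (b - a + s - 1) / s - 1 := by
      rw [hsub]
      have h3 := Int.add_mul_ediv_right ((b - a + s - 1) - 1 * s) 1 (ne_of_gt hs)
      have h4 : (b - a + s - 1 - 1 * s) + 1 * s = b - a + s - 1 := by ring
      rw [h4] at h3
      omega
    rw [this]
    have hn : ((b - a + s - 1) / s).toNat = (((b - a + s - 1) / s - 1)).toNat + 1 := by omega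
    rw [hn, List.range_succ_eq_map]
    simp only [List.map_cons, List.map_map]
    congr 1
    · simp
    · apply List.map_congr_left
      intro k _
      simp only [Function.comp]
      push_cast
      ring
  · rw [if_neg h2]
    have hlt : (b - a + s - 1) / s < 2 := by
      rw [Int.ediv_lt_iff_lt_mul hs]; omega
    have hn : ((b - a + s - 1) / s).toNat = 1 := by omega
    rw [hn]
    simp


theorem pvChunkBands_nil (P : Int → Bool) (k' : Nat) : pvChunkBands P k' [] = [] := by
  rw [pvChunkBands]; simp

theorem pvChunkBands_cons (P : Int → Bool) (k' : Nat) (xs : List Int) (h : xs ≠ []) :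
    pvChunkBands P k' xs =
      pvCondBand ((xs.take (k' + 1)).filter P) ++ pvChunkBands P k' (xs.drop (k' + 1)) := by
  rw [pvChunkBands]; simp [h]

-- A-side: the chunk-scan loop over pyRange computes pvChunkBands of the dropped list.
theorem pvAside (P : Int → Bool) (k' : Nat) (S : List Int) :
    ∀ (n : Nat) (a : Int), 0 ≤ a → n = S.length - a.toNat →
    ∀ acc, (PySem.List.pyRange a (S.length : Int) ((k' + 1 : Nat) : Int)).foldl
      (fun bands idx =>
        let chunk := PySem.List.slice S (some idx) (some (idx + ((k' + 1 : Nat) : Int)))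
        let band := chunk.filter P
        if band ≠ [] then bands ++ [band] else bands) acc
      = acc ++ pvChunkBands P k' (S.drop a.toNat) := by
  intro n
  induction n using Nat.strong_induction_on with
  | _ n ih =>
    intro a ha hn acc
    have hkpos : (0 : Int) < ((k' + 1 : Nat) : Int) := by exact_mod_cast Nat.succ_pos k'
    by_cases hlt : a < (S.length : Int)
    · rw [pvPyRange_pos_cons a (S.length : Int) _ hkpos hlt]
      simp only [List.foldl_cons]
      have hsl : PySem.List.slice S (some a) (some (a + ((k' + 1 : Nat) : Int)))
          = (S.drop a.toNat).take (k' + 1) := by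
        rw [PySem.List.slice_toNat S ha (by omega)]
        congr 1
        omega
      have hm : S.length - (a + ((k' + 1 : Nat) : Int)).toNat < n := by omega
      rw [ih _ hm (a + ((k' + 1 : Nat) : Int)) (by omega) rfl]
      rw [pvChunkBands_cons P k' (S.drop a.toNat)
        (by rw [ne_eq, List.drop_eq_nil_iff]; omega)]
      have hdd : S.drop (a + ((k' + 1 : Nat) : Int)).toNat = (S.drop a.toNat).drop (k' + 1) := by
        rw [List.drop_drop]
        congr 1
        omega
      rw [hdd]
      simp only [hsl]
      by_cases hb : ((S.drop a.toNat).take (k' + 1)).filter P ≠ []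
      · simp only [if_pos hb, pvCondBand, List.append_assoc]
      · simp only [if_neg hb, pvCondBand]
        simp at hb
        simp
    · rw [pvPyRange_pos_nil a _ _ hkpos (not_lt.mp hlt)]
      have hdn : S.drop a.toNat = [] := by
        rw [List.drop_eq_nil_iff]
        omega
      simp [hdn, pvChunkBands_nil]


-- the grouping fold only appends to the bands component
theorem pvGFactor (k : Int) (ps : List (Int × Int)) :
    ∀ bands cur lb, ps.foldl (pvGStep k) (bands, cur, lb)
      = (bands ++ (ps.foldl (pvGStep k) ([], cur, lb)).1, (ps.foldl (pvGStep k) ([], cur, lb)).2) := by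
  induction ps with
  | nil => intro bands cur lb; simp
  | cons pr ps ih =>
    intro bands cur lb
    simp only [List.foldl_cons, pvGStep]
    by_cases hc : some (PySem.Int.floordiv pr.1 k) ≠ lb ∧ cur ≠ []
    · simp only [if_pos hc]
      rw [ih (bands ++ [cur]), ih ([] ++ [cur])]
      simp [List.append_assoc]
    · simp only [if_neg hc]
      exact ih bands (cur ++ [pr.2]) (some (PySem.Int.floordiv pr.1 k))

theorem pvFinishFactor' (k : Int) (ps : List (Int × Int)) (bands : List (List Int))
    (cur : List Int) (lb : Option Int) :
    pvFinish (ps.foldl (pvGStep k) (bands, cur, lb))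
      = bands ++ pvFinish (ps.foldl (pvGStep k) ([], cur, lb)) := by
  rw [pvGFactor]
  unfold pvFinish
  by_cases h : (ps.foldl (pvGStep k) ([], cur, lb)).2.1 ≠ [] <;> simp [h]

-- a run of pairs all in block 0
theorem pvBlock0aux (k : Int) (ps : List (Int × Int))
    (h : ∀ pr ∈ ps, PySem.Int.floordiv pr.1 k = 0) :
    ∀ bands cur, cur ≠ [] →
      ps.foldl (pvGStep k) (bands, cur, some 0) = (bands, cur ++ ps.map (·.2), some 0) := by
  induction ps with
  | nil => intro bands cur _; simp
  | cons pr ps ih =>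
    intro bands cur hcur
    have hb : PySem.Int.floordiv pr.1 k = 0 := h pr (List.mem_cons_self)
    simp only [List.foldl_cons, pvGStep, hb]
    rw [if_neg (by simp)]
    rw [ih (fun q hq => h q (List.mem_cons_of_mem _ hq)) bands (cur ++ [pr.2]) (by simp)]
    simp

theorem pvBlock0 (k : Int) (ps : List (Int × Int))
    (h : ∀ pr ∈ ps, PySem.Int.floordiv pr.1 k = 0) (bands : List (List Int)) :
    ps.foldl (pvGStep k) (bands, [], none)
      = (bands, ps.map (·.2), if ps = [] then none else some 0) := by
  cases ps with
  | nil => simp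
  | cons pr ps =>
    have hb : PySem.Int.floordiv pr.1 k = 0 := h pr (List.mem_cons_self)
    simp only [List.foldl_cons, pvGStep, hb]
    rw [if_neg (by simp)]
    simp only [List.nil_append]
    rw [pvBlock0aux k ps (fun q hq => h q (List.mem_cons_of_mem _ hq)) bands [pr.2] (by simp)]
    simp

-- when no pair continues the pending block, the pending band is flushed first
theorem pvFlush (k : Int) (ps : List (Int × Int)) (bands : List (List Int))
    (cur : List Int) (lb : Option Int)
    (h : ∀ pr ∈ ps, some (PySem.Int.floordiv pr.1 k) ≠ lb) :
    pvFinish (ps.foldl (pvGStep k) (bands, cur, lb))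
      = (if cur ≠ [] then bands ++ [cur] else bands) ++ pvFinish (ps.foldl (pvGStep k) ([], [], none)) := by
  cases ps with
  | nil =>
    simp only [List.foldl_nil, pvFinish]
    by_cases hc : cur ≠ [] <;> simp [hc]
  | cons pr ps =>
    have hb : some (PySem.Int.floordiv pr.1 k) ≠ lb := h pr (List.mem_cons_self)
    simp only [List.foldl_cons, pvGStep]
    by_cases hcur : cur = []
    · subst hcur
      rw [if_neg (by simp), if_neg (by simp)]
      simp only [List.nil_append]
      rw [pvFinishFactor' k ps bands [pr.2]]
      simp
    · rw [if_pos ⟨hb, hcur⟩,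
        if_neg (show ¬(some (PySem.Int.floordiv pr.1 k) ≠ none ∧ ([] : List Int) ≠ []) by simp)]
      rw [if_pos hcur]
      rw [pvFinishFactor' k ps (bands ++ [cur]) [pr.2]]
      simp

-- shifting every index by k shifts every block by one and nothing else
theorem pvGShift (k : Int) (hk : 0 < k) (ps : List (Int × Int)) :
    ∀ bands cur lb,
      (ps.map (fun pr => (pr.1 + k, pr.2))).foldl (pvGStep k) (bands, cur, lb.map (· + 1))
        = ((ps.foldl (pvGStep k) (bands, cur, lb)).1, (ps.foldl (pvGStep k) (bands, cur, lb)).2.1,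
           ((ps.foldl (pvGStep k) (bands, cur, lb)).2.2).map (· + 1)) := by
  induction ps with
  | nil => intro bands cur lb; simp
  | cons pr ps ih =>
    intro bands cur lb
    simp only [List.map_cons, List.foldl_cons, pvGStep]
    have hb : PySem.Int.floordiv (pr.1 + k) k = PySem.Int.floordiv pr.1 k + 1 := by
      rw [PySem.Int.floordiv_eq_ediv_of_pos hk, PySem.Int.floordiv_eq_ediv_of_pos hk]
      have := Int.add_mul_ediv_right pr.1 1 (ne_of_gt hk)
      simpa using this
    rw [hb]
    have hcond : (some (PySem.Int.floordiv pr.1 k + 1) ≠ lb.map (· + 1))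
        = (some (PySem.Int.floordiv pr.1 k) ≠ lb) := by
      cases lb <;> simp
    by_cases hc : some (PySem.Int.floordiv pr.1 k) ≠ lb ∧ cur ≠ []
    · rw [if_pos (by rw [hcond] at *; exact hc), if_pos hc]
      have : some (PySem.Int.floordiv pr.1 k + 1) = Option.map (· + 1) (some (PySem.Int.floordiv pr.1 k)) := by simp
      rw [this, ih]
    · rw [if_neg (by rw [hcond]; exact hc), if_neg hc]
      have : some (PySem.Int.floordiv pr.1 k + 1) = Option.map (· + 1) (some (PySem.Int.floordiv pr.1 k)) := by simp
      rw [this, ih]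

theorem pvEnumShift (xs : List Int) : ∀ (s c : Int),
    PySem.List.enumerate xs (s + c) = (PySem.List.enumerate xs s).map (fun pr => (pr.1 + c, pr.2)) := by
  induction xs with
  | nil => intro s c; simp [PySem.List.enumerate]
  | cons x xs ih =>
    intro s c
    rw [PySem.List.enumerate_cons, PySem.List.enumerate_cons]
    simp only [List.map_cons]
    have : s + c + 1 = (s + 1) + c := by ring
    rw [this, ih]

-- MAIN grouping lemma: B's grouping pass over the filtered indexed list equals chunk-and-filter.
theorem pvFoldFilterMap (g : Int → Option (Int × Int)) (k : Int) (T : List Int) :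
    ∀ st, T.foldl (fun st p => match g p with | none => st | some pr => pvGStep k st pr) st
      = (T.filterMap g).foldl (pvGStep k) st := by
  induction T with
  | nil => intro st; simp
  | cons hd tl ih =>
    intro st
    cases h : g hd with
    | none => simp only [List.foldl_cons, List.filterMap_cons, h]; exact ih st
    | some pr => simp only [List.foldl_cons, List.filterMap_cons, h]; exact ih _

theorem pvMain (P : Int → Bool) (k' : Nat) :
    ∀ (n : Nat) (xs : List Int), xs.length ≤ n →
      pvFinish ((pvPairs P xs).foldl (pvGStep ((k' + 1 : Nat) : Int)) ([], [], none))
        = pvChunkBands P k' xs := by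
  have hnil : pvFinish ((pvPairs P []).foldl (pvGStep ((k' + 1 : Nat) : Int)) ([], [], none))
      = pvChunkBands P k' [] := by
    simp [pvPairs, PySem.List.enumerate, pvFinish, pvChunkBands_nil]
  intro n
  induction n with
  | zero =>
    intro xs hx
    have hxe : xs = [] := List.length_eq_zero_iff.mp (Nat.le_zero.mp hx)
    subst hxe; exact hnil
  | succ n ih =>
    intro xs hx
    by_cases hxe : xs = []
    · subst hxe; exact hnil
    have hk : (0 : Int) < ((k' + 1 : Nat) : Int) := by exact_mod_cast Nat.succ_pos k'
    set c := xs.take (k' + 1) with hc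
    set r := xs.drop (k' + 1) with hr
    have hxcr : xs = c ++ r := (List.take_append_drop _ xs).symm
    have hsplit : pvPairs P xs
        = pvPairs P c ++ (pvPairs P r).map (fun pr => (pr.1 + (c.length : Int), pr.2)) := by
      unfold pvPairs
      conv_lhs => rw [hxcr]
      rw [PySem.List.enumerate_append, List.filter_append]
      congr 1
      rw [pvEnumShift r 0 (c.length : Int), List.filter_map]
      rfl
    have h0 : ∀ pr ∈ pvPairs P c, PySem.Int.floordiv pr.1 ((k' + 1 : Nat) : Int) = 0 := by
      intro pr hpr
      have hpe : pr ∈ PySem.List.enumerate c 0 := List.mem_of_mem_filter hpr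
      rw [PySem.List.mem_enumerate_iff] at hpe
      obtain ⟨j, hj, hpe⟩ := hpe
      have h1 : pr.1 = (j : Int) := by simpa using congrArg Prod.fst hpe
      have hjc : j < k' + 1 := lt_of_lt_of_le hj (by simp [hc])
      rw [PySem.Int.floordiv_eq_ediv_of_pos hk, h1]
      exact Int.ediv_eq_zero_of_lt (by positivity) (by exact_mod_cast hjc)
    have hmap : (pvPairs P c).map (·.2) = c.filter P := by
      unfold pvPairs
      have h2 := List.filter_map (f := fun pr : Int × Int => pr.2) (p := P)
        (l := PySem.List.enumerate c 0)
      rw [PySem.List.map_snd_enumerate] at h2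
      rw [h2]
      rfl
    rw [hsplit, List.foldl_append, pvBlock0 _ _ h0 []]
    by_cases hre : r = []
    · have hpr : pvPairs P r = [] := by rw [hre]; simp [pvPairs, PySem.List.enumerate]
      rw [hpr]
      simp only [List.map_nil, List.foldl_nil]
      rw [pvChunkBands_cons P k' xs hxe, ← hc, ← hr, hre, pvChunkBands_nil, List.append_nil]
      unfold pvFinish pvCondBand
      simp only [hmap]
      by_cases hb : c.filter P ≠ [] <;> simp [hb]
    · have hcl : c.length = k' + 1 := by
        rw [hc, List.length_take]
        have : ¬ xs.length ≤ k' + 1 := by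
          intro hle
          exact hre (by rw [hr]; rw [List.drop_eq_nil_iff]; exact hle)
        omega
      rw [hcl]
      have hsh : ∀ pr ∈ (pvPairs P r).map (fun pr => (pr.1 + ((k' + 1 : Nat) : Int), pr.2)),
          some (PySem.Int.floordiv pr.1 ((k' + 1 : Nat) : Int))
            ≠ (if pvPairs P c = [] then none else some 0) := by
        intro pr hpr
        rcases List.mem_map.mp hpr with ⟨q, hq, rfl⟩
        have hq1 : 0 ≤ q.1 := by
          have hqe := List.mem_of_mem_filter hq
          rw [PySem.List.mem_enumerate_iff] at hqe
          obtain ⟨j, hj, he⟩ := hqe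
          have : q.1 = (j : Int) := by simpa using congrArg Prod.fst he
          omega
        have hge : 1 ≤ PySem.Int.floordiv (q.1 + ((k' + 1 : Nat) : Int)) ((k' + 1 : Nat) : Int) := by
          rw [PySem.Int.floordiv_eq_ediv_of_pos hk, Int.le_ediv_iff_mul_le hk]
          omega
        split
        · simp
        · simp only [ne_eq, Option.some.injEq]
          omega
      rw [pvFlush _ _ _ _ _ hsh]
      have hshift := pvGShift ((k' + 1 : Nat) : Int) hk (pvPairs P r) [] [] none
      simp only [Option.map_none] at hshift
      rw [hshift]
      have hfin : ∀ (st : List (List Int) × List Int × Option Int),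
          pvFinish (st.1, st.2.1, st.2.2.map (· + 1)) = pvFinish st := by
        intro st; simp [pvFinish]
      rw [hfin]
      rw [ih r (by rw [hr]; simp [List.length_drop]; omega)]
      rw [pvChunkBands_cons P k' xs hxe, ← hc, ← hr]
      rw [hmap]
      unfold pvCondBand
      by_cases hb : c.filter P ≠ [] <;> simp [hb]

-- lookup characterisation of the position dict
theorem pvGetFoldlInsert (qs : List (Int × Int)) :
    ∀ (d : PySem.Dict Int Int) (p : Int),
      (qs.foldl (fun d pr => d.insert pr.2 pr.1) d).get? p
        = match qs.reverse.find? (fun pr => pr.2 == p) with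
          | some pr => some pr.1
          | none => d.get? p := by
  induction qs with
  | nil => intro d p; simp
  | cons pr tl ih =>
    intro d p
    simp only [List.foldl_cons]
    rw [ih]
    rw [List.reverse_cons, List.find?_append]
    cases hf : tl.reverse.find? (fun pr => pr.2 == p) with
    | some q => simp [Option.or]
    | none =>
      simp only [Option.or]
      rw [PySem.Dict.get?_insert]
      by_cases hp : p = pr.2
      · simp [hp]
      · have : (pr.2 == p) = false := by simp [Ne.symm hp]
        simp [this, hp]

theorem pvSndInj (l : List (Int × Int)) (h : l.Pairwise (fun a b => a.2 ≠ b.2)) :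
    ∀ x ∈ l, ∀ y ∈ l, x.2 = y.2 → x = y := by
  induction l with
  | nil => intro x hx; cases hx
  | cons a l ih =>
    rw [List.pairwise_cons] at h
    intro x hx y hy hxy
    rcases List.mem_cons.mp hx with rfl | hx' <;> rcases List.mem_cons.mp hy with rfl | hy'
    · rfl
    · exact absurd hxy (h.1 y hy')
    · exact absurd hxy.symm (h.1 x hx')
    · exact ih h.2 x hx' y hy' hxy

theorem pvFindUnique (l : List (Int × Int)) (p : Int)
    (h : l.Pairwise (fun a b => a.2 ≠ b.2)) (pr : Int × Int) :
    l.find? (fun pr => pr.2 == p) = some pr ↔ pr ∈ l ∧ pr.2 = p := by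
  induction l with
  | nil => simp
  | cons a l ih =>
    rw [List.pairwise_cons] at h
    by_cases ha : a.2 = p
    · have hb : (a.2 == p) = true := by simp [ha]
      rw [List.find?_cons]
      simp only [hb]
      constructor
      · rintro h'; cases h'; exact ⟨List.mem_cons_self, ha⟩
      · rintro ⟨hm, hp2⟩
        rcases List.mem_cons.mp hm with rfl | hm'
        · rfl
        · exact absurd (ha.trans hp2.symm) (h.1 pr hm')
    · have hb : (a.2 == p) = false := by simp [ha]
      rw [List.find?_cons]
      simp only [hb]
      rw [ih h.2]
      constructor
      · rintro ⟨hm, hp2⟩; exact ⟨List.mem_cons_of_mem _ hm, hp2⟩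
      · rintro ⟨hm, hp2⟩
        rcases List.mem_cons.mp hm with rfl | hm'
        · exact absurd hp2 ha
        · exact ⟨hm', hp2⟩

theorem pvPosDictGet (S : List Int) (hS : S.Pairwise (· < ·)) (p i : Int) :
    (pvPosDict S).get? p = some i ↔ (i, p) ∈ PySem.List.enumerate S 0 := by
  have hpw : (PySem.List.enumerate S 0).Pairwise (fun a b => a.2 ≠ b.2) := by
    have h1 : (List.map (fun pr => pr.2) (PySem.List.enumerate S 0)).Pairwise (· < ·) := by
      rw [PySem.List.map_snd_enumerate]; exact hS
    exact (List.pairwise_map.mp h1).imp (fun h => ne_of_lt h)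
  have hrev : ((PySem.List.enumerate S 0).reverse).Pairwise (fun a b => a.2 ≠ b.2) :=
    List.pairwise_reverse.mpr (hpw.imp (fun h => Ne.symm h))
  unfold pvPosDict
  rw [pvGetFoldlInsert]
  cases hf : (PySem.List.enumerate S 0).reverse.find? (fun pr => pr.2 == p) with
  | some q =>
    rw [pvFindUnique _ p hrev q] at hf
    simp only [Option.some.injEq]
    constructor
    · rintro rfl
      have : q = (q.1, p) := by rw [← hf.2]
      rw [← this]
      exact List.mem_reverse.mp hf.1
    · intro hm
      have := pvSndInj _ hrev q hf.1 (i, p) (List.mem_reverse.mpr hm) (by simp [hf.2])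
      rw [this]
  | none =>
    rw [List.find?_eq_none] at hf
    simp only [PySem.Dict.get?_empty]
    constructor
    · intro h'; cases h'
    · intro hm
      exact absurd (by simp : ((i, p).2 == p) = true) (hf _ (List.mem_reverse.mpr hm))

-- index monotonicity in a strictly sorted list
theorem pvIdxMono (S : List Int) (hS : S.Pairwise (· < ·)) {i p i' q : Int}
    (h1 : (i, p) ∈ PySem.List.enumerate S 0) (h2 : (i', q) ∈ PySem.List.enumerate S 0)
    (hpq : p < q) : i < i' := by
  rw [PySem.List.mem_enumerate_iff] at h1 h2
  obtain ⟨k1, hk1, he1⟩ := h1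
  obtain ⟨k2, hk2, he2⟩ := h2
  have hi : i = (k1 : Int) := by simpa using congrArg Prod.fst he1
  have hp : p = S[k1] := by simpa using congrArg Prod.snd he1
  have hi' : i' = (k2 : Int) := by simpa using congrArg Prod.fst he2
  have hq : q = S[k2] := by simpa using congrArg Prod.snd he2
  rw [List.pairwise_iff_getElem] at hS
  rcases lt_trichotomy k1 k2 with hlt | heq | hgt
  · omega
  · subst heq; rw [hp, hq] at hpq; exact absurd hpq (lt_irrefl _)
  · have := hS k2 k1 hk2 hk1 hgt
    rw [← hp, ← hq] at this
    exact absurd (hpq.trans this) (lt_irrefl _)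

-- the inverted traversal produces exactly the filtered indexed suffix
theorem pvLookupEq (S T : List Int) (hS : S.Pairwise (· < ·)) (hT : T.Pairwise (· < ·))
    (s : Int) (hs : 0 ≤ s) :
    T.filterMap (fun p => ((pvPosDict S).get? p).bind
        (fun i => if i < s then none else some (i - s, p)))
      = pvPairs (fun p => decide (p ∈ T)) (S.drop s.toNat) := by
  set g := fun p : Int => ((pvPosDict S).get? p).bind
    (fun i => if i < s then none else some (i - s, p)) with hg
  have hginv : ∀ p pr, g p = some pr →
      ∃ i, (pvPosDict S).get? p = some i ∧ ¬ i < s ∧ pr = (i - s, p) := by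
    intro p pr hgp
    replace hgp : ((pvPosDict S).get? p).bind
        (fun i => if i < s then none else some (i - s, p)) = some pr := hgp
    cases hgo : (pvPosDict S).get? p with
    | none => rw [hgo] at hgp; simp at hgp
    | some i =>
      rw [hgo] at hgp
      simp only [Option.bind_some] at hgp
      by_cases his : i < s
      · rw [if_pos his] at hgp; simp at hgp
      · rw [if_neg his] at hgp
        exact ⟨i, rfl, his, (Option.some_inj.mp hgp).symm⟩
  have hmemL : ∀ pr : Int × Int, pr ∈ T.filterMap g ↔
      (pr.2 ∈ T ∧ ∃ (kk : Nat), ∃ (h : kk < S.length),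
        s.toNat ≤ kk ∧ pr.1 = (kk : Int) - s ∧ S[kk] = pr.2) := by
    intro pr
    rw [List.mem_filterMap]
    constructor
    · rintro ⟨p, hpT, hgp⟩
      obtain ⟨i, hgo, his, rfl⟩ := hginv p pr hgp
      rw [pvPosDictGet S hS] at hgo
      rw [PySem.List.mem_enumerate_iff] at hgo
      obtain ⟨kk, hkk, he⟩ := hgo
      have h1 : i = (kk : Int) := by simpa using congrArg Prod.fst he
      have h2 : p = S[kk] := by simpa using congrArg Prod.snd he
      exact ⟨by simpa using hpT, kk, hkk, by omega, by simp [h1], h2.symm⟩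
    · rintro ⟨hpt, kk, hkk, hsk, h1, h2⟩
      refine ⟨pr.2, hpt, ?_⟩
      have hget : (pvPosDict S).get? pr.2 = some ((kk : Int)) := by
        rw [pvPosDictGet S hS, PySem.List.mem_enumerate_iff]
        exact ⟨kk, hkk, by simp [h2]⟩
      show ((pvPosDict S).get? pr.2).bind
        (fun i => if i < s then none else some (i - s, pr.2)) = some pr
      simp only [hget, Option.bind_some]
      rw [if_neg (by omega : ¬ ((kk : Int) < s))]
      rw [Option.some_inj]
      exact Prod.ext (by simp [h1]) rfl
  have hmemR : ∀ pr : Int × Int, pr ∈ pvPairs (fun p => decide (p ∈ T)) (S.drop s.toNat) ↔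
      (pr.2 ∈ T ∧ ∃ (kk : Nat), ∃ (h : kk < S.length),
        s.toNat ≤ kk ∧ pr.1 = (kk : Int) - s ∧ S[kk] = pr.2) := by
    intro pr
    unfold pvPairs
    rw [List.mem_filter, PySem.List.mem_enumerate_iff]
    constructor
    · rintro ⟨⟨j, hj, he⟩, hdec⟩
      have h1 : pr.1 = (j : Int) := by simpa using congrArg Prod.fst he
      have h2 : pr.2 = (S.drop s.toNat)[j] := by simpa using congrArg Prod.snd he
      rw [List.getElem_drop] at h2
      have hjlen : s.toNat + j < S.length := by
        have := hj; rw [List.length_drop] at this; omega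
      refine ⟨by simp at hdec; exact hdec, s.toNat + j, hjlen, by omega, by push_cast; omega, h2.symm⟩
    · rintro ⟨hpt, kk, hkk, hsk, h1, h2⟩
      constructor
      · refine ⟨kk - s.toNat, by rw [List.length_drop]; omega, ?_⟩
        have : (S.drop s.toNat)[kk - s.toNat]'(by rw [List.length_drop]; omega) = S[kk] := by
          rw [List.getElem_drop]
          congr 1
          omega
        rw [this, h2]
        refine Prod.ext ?_ rfl
        simp only []
        omega
      · simp [hpt]
  have hpwL : (T.filterMap g).Pairwise (fun a b : Int × Int => a.1 < b.1) := by
    rw [List.pairwise_filterMap]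
    refine hT.imp ?_
    intro p q hpq b hb b' hb'
    obtain ⟨i, hgo, his, rfl⟩ := hginv p b hb
    obtain ⟨i', hgo', his', rfl⟩ := hginv q b' hb'
    have hi := (pvPosDictGet S hS p i).mp hgo
    have hi' := (pvPosDictGet S hS q i').mp hgo'
    have := pvIdxMono S hS hi hi' hpq
    simp only []
    omega
  have hpwR : (pvPairs (fun p => decide (p ∈ T)) (S.drop s.toNat)).Pairwise
      (fun a b : Int × Int => a.1 < b.1) :=
    List.Pairwise.sublist List.filter_sublist (PySem.List.pairwise_lt_enumerate _ 0)
  have ndL : (T.filterMap g).Nodup :=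
    hpwL.imp (fun h => fun he => absurd (he ▸ h) (lt_irrefl _))
  have ndR : (pvPairs (fun p => decide (p ∈ T)) (S.drop s.toNat)).Nodup :=
    hpwR.imp (fun h => fun he => absurd (he ▸ h) (lt_irrefl _))
  have hperm := (List.perm_ext_iff_of_nodup ndL ndR).mpr
    (fun pr => (hmemL pr).trans (hmemR pr).symm)
  exact List.eq_of_perm_of_sorted
    (fun a b _ _ h1 h2 => absurd (h1.trans h2) (lt_irrefl _)) hpwL hpwR hperm


theorem pvPrimesSorted (n : Int) : (primesUpTo n).Pairwise (· < ·) := by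
  unfold primesUpTo
  split
  · simp
  · refine List.pairwise_map.mpr ?_
    exact List.Pairwise.sublist List.filter_sublist (PySem.List.pairwise_lt_enumerate _ 0)

theorem pvBasisSorted (primes : List Int) :
    (PySem.List.sorted (PySem.Set.ofList primes) (fun x => x) false).Pairwise (· < ·) := by
  have hle := PySem.List.sorted_pairwise (PySem.Set.ofList primes) (fun x => x)
  have hnd : (PySem.List.sorted (PySem.Set.ofList primes) (fun x => x) false).Nodup :=
    (PySem.List.sorted_perm (PySem.Set.ofList primes) (fun x => x) false).nodup_iff.mpr
      (PySem.Set.nodup_ofList primes)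
  exact (hle.and hnd).imp (fun h => lt_of_le_of_ne h.1 h.2)

theorem pvBside (S T : List Int) (hS : S.Pairwise (· < ·)) (hT : T.Pairwise (· < ·))
    (k' : Nat) (b0 : List (List Int)) (s : Int) (hs : 0 ≤ s) :
    (let st := T.foldl
        (fun (st : List (List Int) × List Int × Option Int) p =>
          match ((PySem.List.enumerate S 0).foldl (fun d pr => d.insert pr.2 pr.1)
              PySem.Dict.empty).get? p with
          | none => st
          | some i =>
            if i < s then st
            else
              let b := PySem.Int.floordiv (i - s) ((k' + 1 : Nat) : Int)
              if some b ≠ st.2.2 ∧ st.2.1 ≠ [] then (st.1 ++ [st.2.1], [p], some b)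
              else (st.1, st.2.1 ++ [p], some b))
        (b0, [], none)
      if st.2.1 ≠ [] then st.1 ++ [st.2.1] else st.1)
      = b0 ++ pvChunkBands (fun p => decide (p ∈ T)) k' (S.drop s.toNat) := by
  have hstep : (fun (st : List (List Int) × List Int × Option Int) (p : Int) =>
      match ((PySem.List.enumerate S 0).foldl (fun d pr => d.insert pr.2 pr.1)
          PySem.Dict.empty).get? p with
      | none => st
      | some i =>
        if i < s then st
        else
          let b := PySem.Int.floordiv (i - s) ((k' + 1 : Nat) : Int)
          if some b ≠ st.2.2 ∧ st.2.1 ≠ [] then (st.1 ++ [st.2.1], [p], some b)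
          else (st.1, st.2.1 ++ [p], some b))
    = (fun st p =>
        match (fun p : Int => ((pvPosDict S).get? p).bind
            (fun i => if i < s then none else some (i - s, p))) p with
        | none => st
        | some pr => pvGStep ((k' + 1 : Nat) : Int) st pr) := by
    funext st p
    have hpd : ((PySem.List.enumerate S 0).foldl (fun d pr => d.insert pr.2 pr.1)
        PySem.Dict.empty) = pvPosDict S := rfl
    rw [hpd]
    cases h : (pvPosDict S).get? p with
    | none => simp [h]
    | some i =>
      by_cases hi : i < s
      · simp [h, hi]
      · simp [h, hi, pvGStep]
  rw [hstep]
  show pvFinish (T.foldl (fun st p =>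
      match (fun p : Int => ((pvPosDict S).get? p).bind
          (fun i => if i < s then none else some (i - s, p))) p with
      | none => st
      | some pr => pvGStep ((k' + 1 : Nat) : Int) st pr) (b0, [], none)) = _
  rw [pvFoldFilterMap (fun p : Int => ((pvPosDict S).get? p).bind
      (fun i => if i < s then none else some (i - s, p))) ((k' + 1 : Nat) : Int) T]
  rw [pvLookupEq S T hS hT s hs]
  rw [pvFinishFactor']
  rw [pvMain (fun p => decide (p ∈ T)) k' (S.drop s.toNat).length (S.drop s.toNat) le_rfl]


-- ===== VERDICT (by name: the statement is the Claim_ definition above) =====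
theorem build_bands_spec : Claim_equal_build_bands := by
  unfold Claim_equal_build_bands
  intro primes mode k hdom hpre
  unfold Spec_build_bands
  by_cases hp : primes = []
  · simp [build_bands, build_bands_alt, hp]
  · rcases hpre with hpe | ⟨hby, _⟩ | ⟨hca, hk⟩
    · exact absurd hpe hp
    · subst hby
      simp [build_bands, build_bands_alt, if_neg hp]
    · subst hca
      simp only [build_bands, build_bands_alt, if_neg hp]
      rw [if_neg (show ¬ ("canonical" : String) = "by-basis" by decide),
          if_neg (show ¬ ("canonical" : String) = "by-basis" by decide),
          if_neg (show ¬ ("canonical" : String) ≠ "canonical" by simp),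
          if_neg (show ¬ ("canonical" : String) ≠ "canonical" by simp)]
      set T := PySem.List.sorted (PySem.Set.ofList primes) (fun x => x) false with hTdef
      have hTsort : T.Pairwise (· < ·) := pvBasisSorted primes
      set S := primesUpTo (PySem.List.pyGetD T (-1) 0) with hSdef
      have hSsort : S.Pairwise (· < ·) := pvPrimesSorted _
      obtain ⟨k', hk'⟩ : ∃ k'' : Nat, ((k'' + 1 : Nat) : Int) = k := ⟨(k - 1).toNat, by omega⟩
      rw [← hk']
      have hcontEq : ∀ x : Int, PySem.Set.contains (PySem.Set.ofList T) x = T.contains x := by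
        intro x
        by_cases h : x ∈ T
        · have h1 : PySem.Set.contains (PySem.Set.ofList T) x = true :=
            List.contains_iff_mem.mpr ((PySem.Set.mem_ofList T x).mpr h)
          have h2 : T.contains x = true := List.contains_iff_mem.mpr h
          rw [h1, h2]
        · have h1 : PySem.Set.contains (PySem.Set.ofList T) x = false :=
            Bool.eq_false_iff.mpr (fun hc => h ((PySem.Set.mem_ofList T x).mp (List.contains_iff_mem.mp hc)))
          have h2 : T.contains x = false :=
            Bool.eq_false_iff.mpr (fun hc => h (List.contains_iff_mem.mp hc))
          rw [h1, h2]
      have hPeq : (fun p : Int => PySem.Set.contains (PySem.Set.ofList T) p)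
          = (fun p : Int => decide (p ∈ T)) := by
        funext x
        rw [hcontEq x]
        by_cases h : x ∈ T
        · rw [List.contains_iff_mem.mpr h]; simp [h]
        · rw [Bool.eq_false_iff.mpr (fun hc => h (List.contains_iff_mem.mp hc))]; simp [h]
      rw [hPeq, hcontEq 2]
      by_cases h2 : T.contains 2 = true
      · simp only [h2, if_true]
        rw [pvAside (fun p => decide (p ∈ T)) k' S (S.length - (1 : Int).toNat) 1
          (by norm_num) rfl [[2]]]
        rw [pvBside S T hSsort hTsort k' [[2]] 1 (by norm_num)]
      · simp only [Bool.not_eq_true] at h2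
        simp only [h2, Bool.false_eq_true, if_false]
        rw [pvAside (fun p => decide (p ∈ T)) k' S (S.length - (0 : Int).toNat) 0
          le_rfl rfl []]
        rw [pvBside S T hSsort hTsort k' [] 0 le_rfl]
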